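-- pv_equiv track=rewrite | github.com/nguyentrungduc9310/azure-screenshoot-to-code | services/api-gateway/app/ai/providers/local_provider.py | _clean_local_response
-- ===== SOURCE A (Python) =====
-- def _clean_local_response(content: str) -> str:
--     """Clean up response from local models"""
--     content = content.strip()
--
--     # Remove common prefixes from local models
--     prefixes_to_remove = [
--         "Assistant:",
--         "AI:",
--         "Response:",
--         "Output:",
--         "Result:"
--     ]
--
--     for prefix in prefixes_to_remove:
--         if content.startswith(prefix):
--             content = content[len(prefix):].strip()
--
--     # Remove repetitive patterns common in local models
--     lines = content.split('\n')
--     cleaned_lines = []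
--     prev_line = ""
--     repetition_count = 0
--
--     for line in lines:
--         if line == prev_line:
--             repetition_count += 1
--             if repetition_count < 2:  # Allow one repetition
--                 cleaned_lines.append(line)
--         else:
--             repetition_count = 0
--             cleaned_lines.append(line)
--             prev_line = line
--
--     return '\n'.join(cleaned_lines)
-- ===== SOURCE B (Python) =====
-- def _clean_local_response(content: str) -> str:
--     """Clean up response from local models (run-length scan instead of prev/count state)."""
--     content = content.strip()
--
--     for prefix in ["Assistant:", "AI:", "Response:", "Output:", "Result:"]:
--         if content.startswith(prefix):
--             content = content[len(prefix):].strip()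
--
--     # Collapse each run of identical consecutive lines to at most two copies,
--     # scanning run-by-run with two indices instead of carrying prev/count state.
--     lines = content.split('\n')
--     out = []
--     i = 0
--     while i < len(lines):
--         j = i
--         while j < len(lines) and lines[j] == lines[i]:
--             j += 1
--         out.extend([lines[i]] * min(j - i, 2))
--         i = j
--     return '\n'.join(out)
-- ===== Notes on version B (the rewrite author's own statement) =====
-- stated objective: alternative
-- what changed: The stateful prev_line/repetition_count dedup loop is replaced by a run-length scan: two indices find each run of identical consecutive lines and emit min(run,2) copies of it; the prefix stripping stays.
import Mathlib
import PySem

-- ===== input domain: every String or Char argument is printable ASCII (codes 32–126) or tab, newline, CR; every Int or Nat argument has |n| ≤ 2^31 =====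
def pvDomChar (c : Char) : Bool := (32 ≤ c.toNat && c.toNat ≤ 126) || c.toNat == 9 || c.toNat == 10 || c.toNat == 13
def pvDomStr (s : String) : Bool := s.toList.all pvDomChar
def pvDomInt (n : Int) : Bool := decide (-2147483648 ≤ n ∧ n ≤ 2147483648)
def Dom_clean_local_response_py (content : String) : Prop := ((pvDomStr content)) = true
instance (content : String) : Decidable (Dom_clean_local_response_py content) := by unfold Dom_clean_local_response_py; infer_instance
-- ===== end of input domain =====

-- B replaces A's stateful prev_line/repetition_count dedup loop by a run-length scan
-- (objective: alternative, same cost); the prefix stripping is unchanged.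

-- ===== PORT A =====
def pvPrefixes : List String := ["Assistant:", "AI:", "Response:", "Output:", "Result:"]

-- one step of A's dedup loop over lines, state = (cleaned_lines, prev_line, repetition_count)
def pvStepA (st : List (List Char) × List Char × Nat) (line : List Char) :
    List (List Char) × List Char × Nat :=
  if line = st.2.1 then
    (if st.2.2 + 1 < 2 then st.1 ++ [line] else st.1, st.2.1, st.2.2 + 1)
  else
    (st.1 ++ [line], line, 0)

def clean_local_response_py (content : String) : String :=
  let c0 := PySem.Str.strip content
  let c1 := pvPrefixes.foldl (fun c p =>
    if PySem.Str.startswith c p then PySem.Str.strip (PySem.Str.slice c (some (PySem.Str.len p)) none)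
    else c) c0
  -- content.split('\n'): separator is the nonempty literal "\n", so Chars.splitOn is exact
  let lines := PySem.Chars.splitOn c1.toList ['\n']
  String.ofList (PySem.Chars.join ['\n'] (lines.foldl pvStepA ([], [], 0)).1)

-- ===== PORT B =====
-- inner while: length of the run of lines equal to x at the front, and the remainder
def pvTakeRun (x : List Char) : List (List Char) → Nat × List (List Char)
  | [] => (0, [])
  | y :: ys => if y = x then ((pvTakeRun x ys).1 + 1, (pvTakeRun x ys).2) else (0, y :: ys)

theorem pvTakeRun_len (x : List Char) : ∀ ls, (pvTakeRun x ls).2.length ≤ ls.length := by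
  intro ls
  induction ls with
  | nil => simp [pvTakeRun]
  | cons y ys ih =>
    by_cases h : y = x <;> simp [pvTakeRun, h]
    omega

-- outer while: emit min(run, 2) copies of each run's line, run by run
def pvRunLoop : List (List Char) → List (List Char)
  | [] => []
  | x :: xs =>
    List.replicate (min ((pvTakeRun x xs).1 + 1) 2) x ++ pvRunLoop (pvTakeRun x xs).2
  termination_by ls => ls.length
  decreasing_by simpa using Nat.lt_succ_of_le (pvTakeRun_len x xs)

def clean_local_response_py_alt (content : String) : String :=
  let c0 := PySem.Str.strip content
  let c1 := pvPrefixes.foldl (fun c p =>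
    if PySem.Str.startswith c p then PySem.Str.strip (PySem.Str.slice c (some (PySem.Str.len p)) none)
    else c) c0
  String.ofList (PySem.Chars.join ['\n'] (pvRunLoop (PySem.Chars.splitOn c1.toList ['\n'])))

-- ===== PRECONDITION & SPEC =====
def Spec_clean_local_response_py (content : String) (out : String) : Prop := out = clean_local_response_py_alt content
instance (content : String) (out : String) : Decidable (Spec_clean_local_response_py content out) := by unfold Spec_clean_local_response_py; infer_instance

-- ===== CLAIM (what is proved, stated in full; the proofs are below) =====
def Claim_equal_clean_local_response_py : Prop := ∀ (content : String), Dom_clean_local_response_py content → Spec_clean_local_response_py content (clean_local_response_py content)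

-- ===== LEMMAS AND PROOFS =====

-- A's dedup loop as a "rest of the output" function of the remaining lines and the state
def pvG : List (List Char) → List Char → Nat → List (List Char)
  | [], _, _ => []
  | l :: ls, prev, cnt =>
    if l = prev then (if cnt + 1 < 2 then [l] else []) ++ pvG ls prev (cnt + 1)
    else l :: pvG ls l 0

theorem pvFold_eq_pvG (ls : List (List Char)) :
    ∀ acc prev cnt, (ls.foldl pvStepA (acc, prev, cnt)).1 = acc ++ pvG ls prev cnt := by
  induction ls with
  | nil => intro acc prev cnt; simp [pvG]
  | cons l ls ih =>
    intro acc prev cnt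
    by_cases h : l = prev
    · by_cases h2 : cnt + 1 < 2 <;>
        simp [pvStepA, pvG, h, h2, ih]
    · simp [pvStepA, pvG, h, ih]

-- the two dedup algorithms agree: in-run (count ≥ 1) and at a fresh line
theorem pvMain : ∀ n (ls : List (List Char)), ls.length ≤ n →
    (∀ prev cnt, pvG ls prev (cnt + 1) = pvRunLoop (pvTakeRun prev ls).2) ∧
    (∀ prev, ls.head? ≠ some prev → pvG ls prev 0 = pvRunLoop ls) := by
  intro n
  induction n with
  | zero =>
    intro ls h
    have : ls = [] := List.length_eq_zero_iff.mp (Nat.le_zero.mp h)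
    subst this
    constructor
    · intro prev cnt; simp [pvG, pvTakeRun, pvRunLoop]
    · intro prev _; simp [pvG, pvRunLoop]
  | succ n ih =>
    intro ls h
    match ls with
    | [] =>
      constructor
      · intro prev cnt; simp [pvG, pvTakeRun, pvRunLoop]
      · intro prev _; simp [pvG, pvRunLoop]
    | l :: ls =>
      have hlen : ls.length ≤ n := by simpa using h
      constructor
      · intro prev cnt
        by_cases hp : l = prev
        · subst hp
          have h1 : pvG (l :: ls) l (cnt + 1) = pvG ls l (cnt + 2) := by
            simp [pvG]
          rw [h1, (ih ls hlen).1 l (cnt + 1)]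
          simp [pvTakeRun]
        · -- run of prev is empty; goal becomes pvG (l::ls) prev 0-fresh = pvRunLoop (l::ls)
          have h1 : pvTakeRun prev (l :: ls) = (0, l :: ls) := by simp [pvTakeRun, hp]
          rw [h1]
          show pvG (l :: ls) prev (cnt + 1) = pvRunLoop (l :: ls)
          have h2 : pvG (l :: ls) prev (cnt + 1) = l :: pvG ls l 0 := by simp [pvG, hp]
          rw [h2]
          -- now same as the fresh-line case below
          match ls with
          | [] => simp [pvG, pvRunLoop, pvTakeRun]
          | m :: ms =>
            by_cases hm : m = l
            · subst hm
              have h3 : pvG (m :: ms) m 0 = m :: pvG ms m 1 := by simp [pvG]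
              have hlen2 : ms.length ≤ n := by simp at h; omega
              rw [h3, (ih ms hlen2).1 m 0]
              rw [pvRunLoop]
              simp [pvTakeRun]
            · have h3 : pvG (m :: ms) l 0 = pvRunLoop (m :: ms) := by
                apply (ih (m :: ms) (by simpa using hlen)).2
                simp [hm]
              rw [h3, pvRunLoop]
              simp [pvTakeRun, hm, pvRunLoop]
      · intro prev hne
        have hp : l ≠ prev := by simp at hne; exact hne
        have h2 : pvG (l :: ls) prev 0 = l :: pvG ls l 0 := by simp [pvG, hp]
        rw [h2]
        match ls with
        | [] => simp [pvG, pvRunLoop, pvTakeRun]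
        | m :: ms =>
          by_cases hm : m = l
          · subst hm
            have h3 : pvG (m :: ms) m 0 = m :: pvG ms m 1 := by simp [pvG]
            have hlen2 : ms.length ≤ n := by simp at h; omega
            rw [h3, (ih ms hlen2).1 m 0]
            rw [pvRunLoop]
            simp [pvTakeRun]
          · have h3 : pvG (m :: ms) l 0 = pvRunLoop (m :: ms) := by
              apply (ih (m :: ms) (by simpa using hlen)).2
              simp [hm]
            rw [h3, pvRunLoop]
            simp [pvTakeRun, hm, pvRunLoop]

-- strip leaves no leading whitespace
theorem pvStrip_head (cs : List Char) :
    ∀ c ∈ (PySem.Chars.strip cs).head?, PySem.Chars.isspace c = false := by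
  intro c hc
  unfold PySem.Chars.strip PySem.Chars.rstrip PySem.Chars.lstrip at hc
  set l := List.dropWhile PySem.Chars.isspace cs with hl
  -- rstrip l is a prefix of l
  have hpre : (List.dropWhile PySem.Chars.isspace l.reverse).reverse <+: l := by
    have h1 : List.dropWhile PySem.Chars.isspace l.reverse <:+ l.reverse := List.dropWhile_suffix _
    have h2 : (List.dropWhile PySem.Chars.isspace l.reverse).reverse <+: l.reverse.reverse :=
      List.reverse_prefix.mpr (by simpa using h1)
    simpa using h2
  obtain ⟨u, hu⟩ := hpre
  cases hrev : (List.dropWhile PySem.Chars.isspace l.reverse).reverse with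
  | nil => rw [hrev] at hc; simp at hc
  | cons d t =>
    rw [hrev] at hc hu
    have hcd : d = c := by simpa using hc
    have hld : l.head? = some c := by rw [← hu]; simp [← hcd]
    have hds := List.head?_dropWhile_not PySem.Chars.isspace cs
    rw [← hl, hld] at hds
    simpa using hds

-- the prefix-stripping fold yields a string with no leading whitespace
theorem pvNoLead_fold (ps : List String) (c0 : String)
    (h : ∀ c ∈ c0.toList.head?, PySem.Chars.isspace c = false) :
    ∀ c ∈ (ps.foldl (fun c p =>
      if PySem.Str.startswith c p then PySem.Str.strip (PySem.Str.slice c (some (PySem.Str.len p)) none)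
      else c) c0).toList.head?, PySem.Chars.isspace c = false := by
  induction ps generalizing c0 with
  | nil => simpa using h
  | cons p ps ih =>
    simp only [List.foldl_cons]
    by_cases hs : PySem.Str.startswith c0 p = true
    · rw [if_pos hs]
      apply ih
      intro c hc
      rw [PySem.Str.toList_strip] at hc
      exact pvStrip_head _ c hc
    · rw [if_neg hs]
      exact ih c0 h

theorem pvFoldPrefix_head (s : String) :
    ∀ c ∈ (pvPrefixes.foldl (fun c p =>
      if PySem.Str.startswith c p then PySem.Str.strip (PySem.Str.slice c (some (PySem.Str.len p)) none)
      else c) (PySem.Str.strip s)).toList.head?, PySem.Chars.isspace c = false := by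
  apply pvNoLead_fold
  intro c hc
  rw [PySem.Str.toList_strip] at hc
  exact pvStrip_head _ c hc

-- splitOn.go: the accumulator is prepended (reversed)
theorem pvGo_acc (sep : List Char) : ∀ fuel l cur acc,
    PySem.Chars.splitOn.go sep fuel l cur acc
      = acc.reverse ++ PySem.Chars.splitOn.go sep fuel l cur [] := by
  intro fuel
  induction fuel with
  | zero => intro l cur acc; simp [PySem.Chars.splitOn.go]
  | succ fuel ih =>
    intro l cur acc
    cases l with
    | nil => simp [PySem.Chars.splitOn.go]
    | cons c rest =>
      rw [PySem.Chars.splitOn.go, PySem.Chars.splitOn.go]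
      by_cases h : sep.isPrefixOf (c :: rest) = true
      · simp only [h, if_true]
        rw [ih _ _ (cur.reverse :: acc), ih _ _ [cur.reverse]]
        simp
      · simp only [eq_false_of_ne_true h]
        exact ih _ _ _

-- splitOn.go with empty accumulator: the first piece extends cur.reverse
theorem pvGo_head (sep : List Char) : ∀ fuel l cur,
    ∃ t rest, PySem.Chars.splitOn.go sep fuel l cur [] = (cur.reverse ++ t) :: rest := by
  intro fuel
  induction fuel with
  | zero => intro l cur; exact ⟨l, [], by simp [PySem.Chars.splitOn.go]⟩
  | succ fuel ih =>
    intro l cur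
    cases l with
    | nil => exact ⟨[], [], by simp [PySem.Chars.splitOn.go]⟩
    | cons c rest =>
      rw [PySem.Chars.splitOn.go]
      by_cases h : sep.isPrefixOf (c :: rest) = true
      · simp only [h, if_true]
        rw [pvGo_acc]
        exact ⟨[], PySem.Chars.splitOn.go sep fuel (List.drop sep.length (c :: rest)) [] [], by simp⟩
      · simp only [eq_false_of_ne_true h]
        obtain ⟨t, r, hr⟩ := ih rest (c :: cur)
        exact ⟨c :: t, r, by rw [hr]; simp⟩

-- a string whose head is not '\n' splits into lines whose first line is nonempty
theorem pvSplit_head (c : Char) (t : List Char) (h : c ≠ '\n') :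
    (PySem.Chars.splitOn (c :: t) ['\n']).head? ≠ some [] := by
  rw [PySem.Chars.splitOn, PySem.Chars.splitOn.go]
  have hp : ['\n'].isPrefixOf (c :: t) = false := by
    simp [List.isPrefixOf]
    exact fun hh => absurd hh.symm h
  simp only [List.length_cons, hp, if_false, Bool.false_eq_true]
  obtain ⟨tt, rest, hr⟩ := pvGo_head ['\n'] (t.length + 1) t [c]
  rw [hr]
  simp

-- ===== VERDICT (by name: the statement is the Claim_ definition above) =====
theorem pvDedup_eq (ls : List (List Char)) (h : ls.head? ≠ some [] ∨ ls = [[]]) :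
    (ls.foldl pvStepA ([], [], 0)).1 = pvRunLoop ls := by
  rw [pvFold_eq_pvG ls [] [] 0, List.nil_append]
  rcases h with h | h
  · exact (pvMain ls.length ls le_rfl).2 [] h
  · subst h
    show pvG [[]] [] 0 = pvRunLoop [[]]
    rw [pvRunLoop]
    simp [pvG, pvTakeRun, pvRunLoop]

theorem clean_local_response_py_spec : Claim_equal_clean_local_response_py := by
  intro content _
  set c1 := pvPrefixes.foldl (fun c p =>
    if PySem.Str.startswith c p then PySem.Str.strip (PySem.Str.slice c (some (PySem.Str.len p)) none)
    else c) (PySem.Str.strip content) with hc1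
  have hhead : (PySem.Chars.splitOn c1.toList ['\n']).head? ≠ some [] ∨
      PySem.Chars.splitOn c1.toList ['\n'] = [[]] := by
    cases hl : c1.toList with
    | nil =>
      right
      rfl
    | cons c t =>
      left
      have hsp : PySem.Chars.isspace c = false := by
        have := pvFoldPrefix_head content c
        rw [← hc1, hl] at this
        exact this (by simp)
      have hne : c ≠ '\n' := by
        intro hcn
        rw [hcn] at hsp
        exact absurd hsp (by decide)
      exact pvSplit_head c t hne
  show String.ofList (PySem.Chars.join ['\n']
        ((PySem.Chars.splitOn c1.toList ['\n']).foldl pvStepA ([], [], 0)).1)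
      = String.ofList (PySem.Chars.join ['\n'] (pvRunLoop (PySem.Chars.splitOn c1.toList ['\n'])))
  rw [pvDedup_eq _ hhead]
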